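-- pv_equiv track=rewrite | github.com/Sanchay-T/CypherX | apps/domain/services/capital_gain_parser.py | _normalize_spaced_tokens
-- ===== SOURCE A (Python) =====
-- from typing import Iterable, Sequence
--
-- def _normalize_spaced_tokens(tokens: Sequence[str]) -> str:
--     rebuilt: list[str] = []
--     buffer = ""
--     for token in tokens:
--         if len(token) == 1 and token.isalpha():
--             buffer += token
--             continue
--         if buffer:
--             if token.isalpha():
--                 rebuilt.append(buffer + token)
--             else:
--                 rebuilt.append(buffer)
--                 rebuilt.append(token)
--             buffer = ""
--         else:
--             rebuilt.append(token)
--     if buffer: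
--         rebuilt.append(buffer)
--     return " ".join(rebuilt)
-- ===== SOURCE B (Python) =====
-- from typing import Sequence
--
--
-- def _normalize_spaced_tokens(tokens: Sequence[str]) -> str:
--     toks = list(tokens)
--     if not toks:
--         return ""
--     parts: list[str] = [toks[0]]
--     for prev, cur in zip(toks, toks[1:]):
--         if len(prev) == 1 and prev.isalpha() and cur.isalpha():
--             parts.append(cur)
--         else:
--             parts.append(" ")
--             parts.append(cur)
--     return "".join(parts)
-- ===== Notes on version B (the rewrite author's own statement) =====
-- stated objective: simpler
-- what changed: B drops A's letter-accumulating buffer and run-grouping entirely: it keeps tokens[0] and, for each adjacent pair, appends the next token with a separator that is empty iff the previous token is a single alphabetic letter and the current token is alphabetic, then joins once.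
import Mathlib
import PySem

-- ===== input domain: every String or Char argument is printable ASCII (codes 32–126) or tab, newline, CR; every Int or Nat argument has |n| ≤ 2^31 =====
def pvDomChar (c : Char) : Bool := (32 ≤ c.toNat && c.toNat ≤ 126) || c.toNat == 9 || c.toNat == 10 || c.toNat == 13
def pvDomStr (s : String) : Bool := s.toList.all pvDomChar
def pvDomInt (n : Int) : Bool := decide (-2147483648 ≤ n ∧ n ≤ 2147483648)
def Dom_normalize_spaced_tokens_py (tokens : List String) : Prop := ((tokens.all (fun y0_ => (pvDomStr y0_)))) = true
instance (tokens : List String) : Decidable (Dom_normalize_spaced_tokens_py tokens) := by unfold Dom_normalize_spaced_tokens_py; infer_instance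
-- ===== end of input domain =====

-- B replaces A's single-letter buffer and run-grouping by a pairwise separator rule; objective: simpler.
-- Strings are ported through List Char (PySem.Chars), as PySem prescribes.

-- ===== PORT A =====
-- one loop iteration of A over state (rebuilt, buffer)
def pvAStep (st : List (List Char) × List Char) (token : List Char) : List (List Char) × List Char :=
  if token.length == 1 && PySem.Chars.strIsalpha token then
    (st.1, st.2 ++ token)
  else if st.2 ≠ [] then
    (if PySem.Chars.strIsalpha token then (st.1 ++ [st.2 ++ token], []) else (st.1 ++ [st.2, token], []))
  else
    (st.1 ++ [token], [])

def normalize_spaced_tokens_py (tokens : List String) : String :=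
  let st := (tokens.map String.toList).foldl pvAStep ([], [])
  String.ofList (PySem.Chars.join [' '] (if st.2 ≠ [] then st.1 ++ [st.2] else st.1))

-- ===== PORT B =====
-- one loop iteration of B over the parts list, for an adjacent pair (prev, cur)
def pvBStep (parts : List (List Char)) (pc : List Char × List Char) : List (List Char) :=
  if pc.1.length == 1 && PySem.Chars.strIsalpha pc.1 && PySem.Chars.strIsalpha pc.2 then
    parts ++ [pc.2]
  else
    parts ++ [[' '], pc.2]

def normalize_spaced_tokens_py_alt (tokens : List String) : String :=
  match tokens.map String.toList with
  | [] => ""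
  | t :: rest =>
      String.ofList (PySem.Chars.join []
        (((t :: rest).zip rest).foldl pvBStep [t]))

-- ===== PRECONDITION & SPEC =====
def Spec_normalize_spaced_tokens_py (tokens : List String) (out : String) : Prop := out = normalize_spaced_tokens_py_alt tokens
instance (tokens : List String) (out : String) : Decidable (Spec_normalize_spaced_tokens_py tokens out) := by unfold Spec_normalize_spaced_tokens_py; infer_instance

-- ===== CLAIM (what is proved, stated in full; the proofs are below) =====
def Claim_equal_normalize_spaced_tokens_py : Prop := ∀ (tokens : List String), Dom_normalize_spaced_tokens_py tokens → Spec_normalize_spaced_tokens_py tokens (normalize_spaced_tokens_py tokens)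

-- ===== LEMMAS AND PROOFS =====

-- join with the empty separator is concatenation of the parts
theorem pv_join_empty (xs : List (List Char)) : PySem.Chars.join [] xs = xs.flatten := by
  induction xs with
  | nil => simp [PySem.Chars.join_nil]
  | cons a as ih =>
      cases as with
      | nil => simp [PySem.Chars.join_singleton]
      | cons b bs => rw [PySem.Chars.join_cons_cons, ih]; simp

-- appending one more part to a nonempty join inserts one separator
theorem pv_join_append_singleton (sep x : List Char) :
    ∀ (xs : List (List Char)), xs ≠ [] →
    PySem.Chars.join sep (xs ++ [x]) = PySem.Chars.join sep xs ++ sep ++ x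
  | [], h => absurd rfl h
  | [a], _ => by
      show PySem.Chars.join sep (a :: [x]) = _
      rw [PySem.Chars.join_cons_cons, PySem.Chars.join_singleton, PySem.Chars.join_singleton]
  | a :: b :: bs, _ => by
      show PySem.Chars.join sep (a :: b :: (bs ++ [x])) = _
      rw [PySem.Chars.join_cons_cons, PySem.Chars.join_cons_cons,
          show b :: (bs ++ [x]) = (b :: bs) ++ [x] from rfl,
          pv_join_append_singleton sep x (b :: bs) (by simp)]
      simp

-- extending the LAST part extends the join
theorem pv_join_extend_last (sep x y : List Char) (xs : List (List Char)) :
    PySem.Chars.join sep (xs ++ [x ++ y]) = PySem.Chars.join sep (xs ++ [x]) ++ y := by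
  cases xs with
  | nil => simp [PySem.Chars.join_singleton]
  | cons a as =>
      rw [pv_join_append_singleton sep _ _ (by simp), pv_join_append_singleton sep _ _ (by simp)]
      simp

def pvSingleAlpha (t : List Char) : Bool := t.length == 1 && PySem.Chars.strIsalpha t

theorem pv_singleAlpha_ne_nil {t : List Char} (h : pvSingleAlpha t = true) : t ≠ [] := by
  unfold pvSingleAlpha at h
  cases t with
  | nil => simp at h
  | cons c cs => simp

-- A's join-of-state from any mid-loop state equals B's join-of-parts, under the loop invariant.
theorem pv_main (rest : List (List Char)) :
    ∀ (rebuilt : List (List Char)) (buffer prev : List Char) (parts : List (List Char)),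
    (buffer ≠ [] → pvSingleAlpha prev = true) →
    (buffer = [] → rebuilt ≠ [] ∧ pvSingleAlpha prev = false) →
    PySem.Chars.join [' '] (if buffer ≠ [] then rebuilt ++ [buffer] else rebuilt)
      = PySem.Chars.join [] parts →
    (let st := rest.foldl pvAStep (rebuilt, buffer);
     PySem.Chars.join [' '] (if st.2 ≠ [] then st.1 ++ [st.2] else st.1))
      = PySem.Chars.join [] (((prev :: rest).zip rest).foldl pvBStep parts) := by
  induction rest with
  | nil =>
      intro rebuilt buffer prev parts _ _ h3
      simpa using h3
  | cons r rs ih =>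
      intro rebuilt buffer prev parts h1 h2 h3
      have hzip : ((prev :: r :: rs).zip (r :: rs)) = (prev, r) :: ((r :: rs).zip rs) := by simp
      rw [hzip]
      simp only [List.foldl_cons]
      by_cases hr : pvSingleAlpha r = true
      · -- r is a single alphabetic letter: A buffers it
        have hr' := hr
        unfold pvSingleAlpha at hr'
        have hrA : PySem.Chars.strIsalpha r = true := (Bool.and_eq_true_iff.mp hr').2
        have hA : pvAStep (rebuilt, buffer) r = (rebuilt, buffer ++ r) := by
          simp [pvAStep, hr']
        have hrne : buffer ++ r ≠ [] := by
          have := pv_singleAlpha_ne_nil hr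
          simp [this]
        rw [hA]
        by_cases hb : buffer = []
        · -- first of a run: B inserts a space
          obtain ⟨hreb, hprev⟩ := h2 hb
          have hcond : ((prev.length == 1 && PySem.Chars.strIsalpha prev) && PySem.Chars.strIsalpha r) = false := by
            unfold pvSingleAlpha at hprev; simp [hprev]
          have hB : pvBStep parts (prev, r) = parts ++ [[' '], r] := by
            simp [pvBStep, hcond]
          rw [hB]
          refine ih rebuilt (buffer ++ r) r _ (fun _ => hr) (fun hc => absurd hc hrne) ?_
          rw [if_pos hrne, hb, List.nil_append,
              pv_join_append_singleton _ _ _ hreb]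
          rw [hb, if_neg (by simp)] at h3
          rw [h3]; simp [pv_join_empty]
        · -- continuing a run: B glues
          have hprev := h1 hb
          unfold pvSingleAlpha at hprev
          have hcond : ((prev.length == 1 && PySem.Chars.strIsalpha prev) && PySem.Chars.strIsalpha r) = true := by
            simp [hprev, hrA]
          have hB : pvBStep parts (prev, r) = parts ++ [r] := by
            simp [pvBStep, hcond]
          rw [hB]
          refine ih rebuilt (buffer ++ r) r _ (fun _ => hr) (fun hc => absurd hc hrne) ?_
          rw [if_pos hrne, pv_join_extend_last]
          rw [if_pos hb] at h3
          rw [h3]; simp [pv_join_empty]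
      · -- r is not a single alphabetic letter
        have hr' : (r.length == 1 && PySem.Chars.strIsalpha r) = false := by
          unfold pvSingleAlpha at hr; simpa using hr
        by_cases hb : buffer = []
        · obtain ⟨hreb, hprev⟩ := h2 hb
          have hA : pvAStep (rebuilt, buffer) r = (rebuilt ++ [r], []) := by
            simp [pvAStep, hr', hb]
          have hcond : ((prev.length == 1 && PySem.Chars.strIsalpha prev) && PySem.Chars.strIsalpha r) = false := by
            unfold pvSingleAlpha at hprev; simp [hprev]
          have hB : pvBStep parts (prev, r) = parts ++ [[' '], r] := by
            simp [pvBStep, hcond]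
          rw [hA, hB]
          refine ih (rebuilt ++ [r]) [] r _ (by simp) (fun _ => ⟨by simp, hr'⟩) ?_
          rw [if_neg (by simp), pv_join_append_singleton _ _ _ hreb]
          rw [hb, if_neg (by simp)] at h3
          rw [h3]; simp [pv_join_empty]
        · have hprev := h1 hb
          unfold pvSingleAlpha at hprev
          by_cases hra : PySem.Chars.strIsalpha r = true
          · -- flush merged: rebuilt ++ [buffer ++ r]
            have hrl : ¬ r.length = 1 := by
              simp [hra] at hr'; simpa using hr'
            have hA : pvAStep (rebuilt, buffer) r = (rebuilt ++ [buffer ++ r], []) := by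
              simp [pvAStep, hb, hra, hrl]
            have hcond : ((prev.length == 1 && PySem.Chars.strIsalpha prev) && PySem.Chars.strIsalpha r) = true := by
              simp [hprev, hra]
            have hB : pvBStep parts (prev, r) = parts ++ [r] := by
              simp [pvBStep, hcond]
            rw [hA, hB]
            refine ih (rebuilt ++ [buffer ++ r]) [] r _ (by simp) (fun _ => ⟨by simp, hr'⟩) ?_
            rw [if_neg (by simp), pv_join_extend_last]
            rw [if_pos hb] at h3
            rw [h3]; simp [pv_join_empty]
          · -- flush separate: rebuilt ++ [buffer, r]
            have hraf : PySem.Chars.strIsalpha r = false := by simpa using hra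
            have hA : pvAStep (rebuilt, buffer) r = (rebuilt ++ [buffer, r], []) := by
              simp [pvAStep, hb, hraf]
            have hcond : ((prev.length == 1 && PySem.Chars.strIsalpha prev) && PySem.Chars.strIsalpha r) = false := by
              simp [hraf]
            have hB : pvBStep parts (prev, r) = parts ++ [[' '], r] := by
              simp [pvBStep, hcond]
            rw [hA, hB]
            refine ih (rebuilt ++ [buffer, r]) [] r _ (by simp) (fun _ => ⟨by simp, hr'⟩) ?_
            rw [if_neg (by simp),
                show rebuilt ++ [buffer, r] = (rebuilt ++ [buffer]) ++ [r] by simp,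
                pv_join_append_singleton _ _ _ (by simp)]
            rw [if_pos hb] at h3
            rw [h3]; simp [pv_join_empty]

-- ===== VERDICT (by name: the statement is the Claim_ definition above) =====
theorem normalize_spaced_tokens_py_spec : Claim_equal_normalize_spaced_tokens_py := by
  unfold Claim_equal_normalize_spaced_tokens_py
  intro tokens _
  unfold Spec_normalize_spaced_tokens_py normalize_spaced_tokens_py normalize_spaced_tokens_py_alt
  cases htl : tokens.map String.toList with
  | nil => simp [PySem.Chars.join_nil]
  | cons t rest =>
      simp only [List.foldl_cons]
      refine congrArg String.ofList ?_
      by_cases ht : pvSingleAlpha t = true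
      · have ht' := ht
        unfold pvSingleAlpha at ht'
        have hA : pvAStep ([], []) t = ([], t) := by
          simp [pvAStep, ht']
        have htne : t ≠ [] := pv_singleAlpha_ne_nil ht
        rw [hA]
        exact pv_main rest [] t t [t] (fun _ => ht) (fun hc => absurd hc htne)
          (by rw [if_pos htne]; simp [PySem.Chars.join_singleton])
      · have ht' : (t.length == 1 && PySem.Chars.strIsalpha t) = false := by
          unfold pvSingleAlpha at ht; simpa using ht
        have hA : pvAStep ([], []) t = ([t], []) := by
          simp [pvAStep, ht']
        rw [hA]
        exact pv_main rest [t] [] t [t] (by simp) (fun _ => ⟨by simp, ht'⟩)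
          (by rw [if_neg (by simp)]; simp [PySem.Chars.join_singleton])
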